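-- pv_equiv track=rewrite | github.com/MikeBeller/advent | 2025/01.py | part2
-- ===== SOURCE A (Python) =====
-- def part2(inp):
--     tot = 50; c = 0
--     for nm in inp:
--         dr = -1 if nm < 0 else 1
--         for i in range(abs(nm)):
--             tot += dr
--             if tot % 100 == 0:
--                 c += 1
--             tot = tot % 100
--     return c
-- ===== SOURCE B (Python) =====
-- def part2(inp):
--     tot = 50; c = 0
--     for nm in inp:
--         if nm >= 0:
--             c += (tot + nm) // 100
--         else:
--             c += ((-tot) % 100 - nm) // 100
--         tot = (tot + nm) % 100
--     return c
-- ===== Notes on version B (the rewrite author's own statement) =====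
-- stated objective: faster
-- what changed: Replaces A's unit-step inner loop over range(abs(nm)) with a per-entry closed form counting multiples of 100 crossed via floor division.
import Mathlib
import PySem

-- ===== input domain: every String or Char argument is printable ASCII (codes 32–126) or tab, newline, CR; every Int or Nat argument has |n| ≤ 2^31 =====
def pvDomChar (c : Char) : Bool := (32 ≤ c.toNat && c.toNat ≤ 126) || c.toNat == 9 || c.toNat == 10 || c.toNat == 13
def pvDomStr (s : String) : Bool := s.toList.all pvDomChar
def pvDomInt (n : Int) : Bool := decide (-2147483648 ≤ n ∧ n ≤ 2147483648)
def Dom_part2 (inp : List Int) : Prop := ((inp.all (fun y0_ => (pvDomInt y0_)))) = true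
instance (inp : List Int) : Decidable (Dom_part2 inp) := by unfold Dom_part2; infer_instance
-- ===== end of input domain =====

-- B replaces A's unit-step simulation with a per-entry floor-division closed form (asymptotically faster).

-- ===== PORT A =====
-- body of A's inner 'for i in range(abs(nm))' loop, step for step
def part2Step (dr : Int) (st : Int × Int) : Int × Int :=
  let tot := st.1 + dr
  let c := if PySem.Int.mod tot 100 = 0 then st.2 + 1 else st.2
  (PySem.Int.mod tot 100, c)

def part2Inner (nm : Int) (st : Int × Int) : Int × Int :=
  let dr : Int := if nm < 0 then -1 else 1
  (List.range nm.natAbs).foldl (fun st _ => part2Step dr st) st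

def part2 (inp : List Int) : Int :=
  (inp.foldl (fun st nm => part2Inner nm st) (50, 0)).2

-- ===== PORT B =====
def part2_alt (inp : List Int) : Int :=
  (inp.foldl (fun (st : Int × Int) nm =>
    let c := if nm ≥ 0 then st.2 + PySem.Int.floordiv (st.1 + nm) 100
             else st.2 + PySem.Int.floordiv (PySem.Int.mod (-st.1) 100 - nm) 100
    (PySem.Int.mod (st.1 + nm) 100, c)) (50, 0)).2

-- ===== PRECONDITION & SPEC =====
def Spec_part2 (inp : List Int) (out : Int) : Prop := out = part2_alt inp
instance (inp : List Int) (out : Int) : Decidable (Spec_part2 inp out) := by unfold Spec_part2; infer_instance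

-- ===== CLAIM (what is proved, stated in full; the proofs are below) =====
def Claim_equal_part2 : Prop := ∀ (inp : List Int), Dom_part2 inp → Spec_part2 inp (part2 inp)

-- ===== LEMMAS AND PROOFS =====

theorem mod100 (a : Int) : PySem.Int.mod a 100 = a % 100 :=
  PySem.Int.mod_eq_emod_of_pos (by norm_num)

theorem fdiv100 (a : Int) : PySem.Int.floordiv a 100 = a / 100 :=
  PySem.Int.floordiv_eq_ediv_of_pos (by norm_num)

theorem foldRange_succ {α : Type} (f : α → α) (m : Nat) (s : α) :
    (List.range (m + 1)).foldl (fun st _ => f st) s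
      = f ((List.range m).foldl (fun st _ => f st) s) := by
  simp [List.range_succ]

theorem upFold (m : Nat) (t c : Int) (h0 : 0 ≤ t) (h1 : t < 100) :
    (List.range m).foldl (fun st _ => part2Step 1 st) (t, c)
      = ((t + m) % 100, c + (t + m) / 100) := by
  induction m generalizing t c with
  | zero => simp; omega
  | succ k ih =>
    rw [foldRange_succ, ih t c h0 h1]
    simp only [part2Step, mod100]
    split_ifs <;> (apply Prod.ext <;> simp <;> omega)

theorem downFold (m : Nat) (t c : Int) (h0 : 0 ≤ t) (h1 : t < 100) :
    (List.range m).foldl (fun st _ => part2Step (-1) st) (t, c)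
      = ((t - m) % 100, c + ((-t) % 100 + m) / 100) := by
  induction m generalizing t c with
  | zero => simp; omega
  | succ k ih =>
    rw [foldRange_succ, ih t c h0 h1]
    simp only [part2Step, mod100]
    split_ifs <;> (apply Prod.ext <;> simp <;> omega)

theorem inner_up (n : Nat) (t c : Int) (h0 : 0 ≤ t) (h1 : t < 100) :
    part2Inner (n : Int) (t, c) = ((t + n) % 100, c + (t + n) / 100) := by
  unfold part2Inner
  rw [if_neg (by omega : ¬ ((n : Nat) : Int) < 0), Int.natAbs_natCast]
  exact upFold n t c h0 h1

theorem inner_down (n : Nat) (t c : Int) (hn : 0 < n) (h0 : 0 ≤ t) (h1 : t < 100) :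
    part2Inner (-(n : Int)) (t, c) = ((t - n) % 100, c + ((-t) % 100 + n) / 100) := by
  unfold part2Inner
  rw [if_pos (by omega : (-(n : Int)) < 0)]
  have : (-(n : Int)).natAbs = n := by omega
  rw [this]
  exact downFold n t c h0 h1

-- outer loop invariant
theorem outer_inv (inp : List Int) (t c : Int) (h0 : 0 ≤ t) (h1 : t < 100) :
    (inp.foldl (fun st nm => part2Inner nm st) (t, c)).2
      = (inp.foldl (fun (st : Int × Int) nm =>
          let c := if nm ≥ 0 then st.2 + PySem.Int.floordiv (st.1 + nm) 100
                   else st.2 + PySem.Int.floordiv (PySem.Int.mod (-st.1) 100 - nm) 100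
          (PySem.Int.mod (st.1 + nm) 100, c)) (t, c)).2 := by
  induction inp generalizing t c with
  | nil => rfl
  | cons nm rest ih =>
    have ih' := ih
    simp only [mod100, fdiv100] at ih'
    simp only [List.foldl_cons, mod100, fdiv100]
    by_cases h : 0 ≤ nm
    · have hn : nm = ((nm.toNat : Nat) : Int) := (Int.toNat_of_nonneg h).symm
      rw [hn, inner_up _ t c h0 h1, if_pos (by omega : ((nm.toNat : Nat) : Int) ≥ 0)]
      exact ih' ((t + (nm.toNat : Int)) % 100) (c + (t + (nm.toNat : Int)) / 100)
        (by omega) (by omega)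
    · have hn : nm = -(((-nm).toNat : Nat) : Int) := by omega
      rw [hn, inner_down _ t c (by omega) h0 h1,
        if_neg (by omega : ¬ (-(((-nm).toNat : Nat) : Int) ≥ 0))]
      have e1 : (t - (((-nm).toNat : Nat) : Int)) = t + -(((-nm).toNat : Nat) : Int) := by ring
      have e2 : ((-t) % 100 + (((-nm).toNat : Nat) : Int))
          = (-t) % 100 - -(((-nm).toNat : Nat) : Int) := by ring
      rw [e1, e2]
      exact ih' ((t + -(((-nm).toNat : Nat) : Int)) % 100)
        (c + ((-t) % 100 - -(((-nm).toNat : Nat) : Int)) / 100) (by omega) (by omega)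

-- ===== VERDICT (by name: the statement is the Claim_ definition above) =====
theorem part2_spec : Claim_equal_part2 := by
  intro inp _
  unfold Spec_part2 part2 part2_alt
  exact outer_inv inp 50 0 (by norm_num) (by norm_num)
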